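-- pv_equiv track=rewrite | github.com/Bheinarl/algorithm_course_in_ss_afy | baekjoon/baekjoon_17140이차원배열과연산.py | R_operation
-- ===== SOURCE A (Python) =====
-- def R_operation(arr):
--     new_arr = []
--     max_len = 0
--
--     for row in arr:
--         count = {}
--
--         # 개수 카운트
--         for x in row:
--             if x == 0:  # 0은 무시
--                 continue
--             if x not in count:
--                 count[x] = 1
--             elif x in count:
--                 count[x] += 1
--
--         # [(숫자, 횟수)] 리스트 생성
--         pairs = []
--         for num in count:
--             pairs.append((num, count[num]))
--
--         # 정렬 (횟수, 숫자 순으로)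
--         pairs.sort(key=lambda x: (x[1], x[0]))
--
--         # 배열로 변환
--         new_row = []
--         for num, cnt in pairs:
--             new_row.append(num)
--             new_row.append(cnt)
--
--         # 길이 제한
--         new_row = new_row[:100]
--         max_len = max(max_len, len(new_row))
--         new_arr.append(new_row)
--
--     # 0 패딩
--     for row in new_arr:
--         while len(row) < max_len:
--             row.append(0)
--
--     return new_arr
-- ===== SOURCE B (Python) =====
-- def _row(row):
--     # sort the nonzero values, then run-length scan the sorted list into (value, count) pairs
--     vals = sorted(v for v in row if v != 0)
--     pairs = []
--     i = 0
--     while i < len(vals):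
--         v = vals[i]
--         k = 1
--         while i + k < len(vals) and vals[i + k] == v:
--             k += 1
--         pairs.append((v, k))
--         i += k
--     pairs.sort(key=lambda p: (p[1], p[0]))
--     flat = [x for p in pairs for x in p]
--     return flat[:100]
--
--
-- def R_operation(arr):
--     rows = [_row(row) for row in arr]
--     width = max(map(len, rows), default=0)
--     return [r + [0] * (width - len(r)) for r in rows]
-- ===== Notes on version B (the rewrite author's own statement) =====
-- stated objective: alternative
-- what changed: Per row, the dict-based single-pass counting with key iteration is replaced by sorting the nonzero values and run-length scanning the sorted list into (value,count) pairs; the flattening loop becomes a comprehension and the while-loop zero padding becomes arithmetic padding against a width computed once.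
import Mathlib
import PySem

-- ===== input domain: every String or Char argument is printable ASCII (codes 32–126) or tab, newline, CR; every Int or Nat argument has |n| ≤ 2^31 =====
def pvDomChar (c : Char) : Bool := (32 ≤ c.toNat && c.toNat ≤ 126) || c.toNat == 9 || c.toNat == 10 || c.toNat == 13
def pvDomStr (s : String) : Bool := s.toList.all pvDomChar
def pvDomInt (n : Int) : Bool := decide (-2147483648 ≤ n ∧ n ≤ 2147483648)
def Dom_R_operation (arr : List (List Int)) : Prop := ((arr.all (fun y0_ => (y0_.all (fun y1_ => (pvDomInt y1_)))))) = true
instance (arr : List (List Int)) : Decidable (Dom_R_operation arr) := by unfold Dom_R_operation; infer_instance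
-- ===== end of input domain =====

-- B replaces A's per-row dict counting by sort + run-length scan and the while-loop padding by
-- arithmetic padding (alternative algorithm, same return value; neither mutates its argument).

-- ===== PORT A =====
-- A-side helpers: pvRowA is the body of A's main loop (count dict, pairs, sort, flatten, truncate);
-- pvPadA is A's `while len(row) < max_len: row.append(0)` loop.
def pvRowA (row : List Int) : List Int :=
  -- `count[x] += 1` on a present key is an overwriting insert with the current value + 1 (exact: key present)
  let count := row.foldl (fun (count : PySem.Dict Int Int) x =>
    if x == 0 then count
    else if count.contains x = false then count.insert x 1
    else if count.contains x = true then count.insert x (count.getD x 0 + 1)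
    else count) PySem.Dict.empty
  -- `count[num]` cannot fail (num is a key), so getD is exact
  let pairs := count.keys.foldl (fun ps num => ps ++ [(num, count.getD num 0)]) ([] : List (Int × Int))
  let pairs2 := PySem.List.sorted2 pairs (fun p => p.2) (fun p => p.1) false
  let newRow := pairs2.foldl (fun r p => r ++ [p.1, p.2]) ([] : List Int)
  PySem.List.slice newRow none (some 100)

def pvPadA (row : List Int) (m : Int) : List Int :=
  if (row.length : Int) < m then pvPadA (row ++ [0]) m else row
termination_by (m - row.length).toNat
decreasing_by simp [List.length_append]; omega

def R_operation (arr : List (List Int)) : List (List Int) :=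
  let st := arr.foldl (fun (st : List (List Int) × Int) row =>
    let newRow := pvRowA row
    (st.1 ++ [newRow], max st.2 (newRow.length : Int))) (([] : List (List Int)), (0 : Int))
  st.1.map (fun row => pvPadA row st.2)

-- ===== PORT B =====
-- B-side helpers: pvRuns is the run-length scan over the sorted values (the two nested whiles:
-- the inner while counts the run `k = 1 + |takeWhile (= v)|`, `i += k` skips it = dropWhile);
-- pvRowB is the helper _row of Source B.
def pvRuns (vals : List Int) : List (Int × Int) :=
  match vals with
  | [] => []
  | v :: rest =>
      (v, (1 : Int) + (rest.takeWhile (fun w => w == v)).length) ::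
        pvRuns (rest.dropWhile (fun w => w == v))
termination_by vals.length
decreasing_by
  have := List.length_dropWhile_le (fun w => w == v) rest
  simp only [List.length_cons]; omega

def pvRowB (row : List Int) : List Int :=
  let vals := PySem.List.sorted (row.filter (fun v => !(v == 0))) (fun x => x) false
  let pairs := PySem.List.sorted2 (pvRuns vals) (fun p => p.2) (fun p => p.1) false
  let flat := pairs.flatMap (fun p => [p.1, p.2])
  PySem.List.slice flat none (some 100)

def R_operation_alt (arr : List (List Int)) : List (List Int) :=
  let rows := arr.map pvRowB
  let width := PySem.List.maxD (rows.map (fun r => (r.length : Int))) (fun x => x) 0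
  -- `r + [0] * (width - len(r))`: a negative repeat count gives [], exactly Int.toNat's clamp
  rows.map (fun r => r ++ List.replicate (width - (r.length : Int)).toNat 0)

-- ===== PRECONDITION & SPEC =====
def Spec_R_operation (arr : List (List Int)) (out : List (List Int)) : Prop := out = R_operation_alt arr
instance (arr : List (List Int)) (out : List (List Int)) : Decidable (Spec_R_operation arr out) := by unfold Spec_R_operation; infer_instance

-- ===== CLAIM (what is proved, stated in full; the proofs are below) =====
def Claim_equal_R_operation : Prop := ∀ (arr : List (List Int)), Dom_R_operation arr → Spec_R_operation arr (R_operation arr)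

-- ===== LEMMAS AND PROOFS =====

-- the lexicographic pair key both sorts use, as an injective single key
theorem pvLexKey_inj : Function.Injective (fun p : Int × Int => toLex (p.2, p.1)) := by
  intro a b h
  have h2 := congrArg ofLex h
  simp only [ofLex_toLex, Prod.mk.injEq] at h2
  exact Prod.ext h2.2 h2.1

-- sorted2 with keys (p.2, p.1) is sorted with the lexicographic key
theorem pvSorted2_eq_sorted_lex (xs : List (Int × Int)) :
    PySem.List.sorted2 xs (fun p => p.2) (fun p => p.1) false
      = PySem.List.sorted xs (fun p => toLex (p.2, p.1)) false := by
  rw [PySem.List.sorted_eq_foldl_insertBy]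
  simp only [PySem.List.sorted2]
  have hbefore : (fun a b : Int × Int =>
        decide (a.2 < b.2) || (!decide (b.2 < a.2) && decide (a.1 < b.1)))
      = fun a b : Int × Int => decide (toLex (a.2, a.1) < toLex (b.2, b.1)) := by
    funext a b
    rw [show (decide (a.2 < b.2) || (!decide (b.2 < a.2) && decide (a.1 < b.1)))
          = decide (a.2 < b.2 ∨ (a.2 ≤ b.2 ∧ a.1 < b.1)) by
        by_cases h : b.2 < a.2
        · simp [h, not_le.mpr h]
        · simp [h, not_lt.mp h]]
    refine decide_eq_decide.mpr ?_
    rw [Prod.Lex.lt_iff]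
    simp only [ofLex_toLex]
    omega
  rw [← hbefore]
  simp

-- A's counting loop builds Counter(nonzeros)
theorem pvCountA_eq (row : List Int) :
    row.foldl (fun (count : PySem.Dict Int Int) x =>
        if x == 0 then count
        else if count.contains x = false then count.insert x 1
        else if count.contains x = true then count.insert x (count.getD x 0 + 1)
        else count) PySem.Dict.empty
      = PySem.Dict.counter (row.filter (fun v => !(v == 0))) := by
  rw [← PySem.Dict.foldl_insert_getD_add_one_eq_counter, List.foldl_filter]
  congr 1
  funext d x
  by_cases h0 : x == 0
  · simp [h0]
  · by_cases hc : d.contains x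
    · simp [h0, hc]
    · simp [h0, hc, PySem.Dict.getD_of_not_contains d 0 (by simpa using hc)]

-- A's pairs loop over Counter(nzr)
theorem pvPairsA_eq (nzr : List Int) :
    (PySem.Dict.counter nzr).keys.foldl
        (fun ps num => ps ++ [(num, (PySem.Dict.counter nzr).getD num 0)]) ([] : List (Int × Int))
      = (PySem.Set.ofList nzr).map (fun k => (k, (nzr.count k : Int))) := by
  rw [PySem.List.foldl_append_singleton_eq_map (fun num => (num, (PySem.Dict.counter nzr).getD num 0))]
  simp [PySem.Dict.keys_counter, PySem.Dict.getD_counter]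

-- the head of a dropWhile fails the predicate
theorem pvDropWhile_head_false {α : Type} (p : α → Bool) :
    ∀ (l : List α) (h : α) (t : List α), l.dropWhile p = h :: t → p h = false := by
  intro l
  induction l with
  | nil => intro h t hl; simp at hl
  | cons x xs ih =>
      intro h t hl
      by_cases hx : p x
      · rw [List.dropWhile_cons_of_pos hx] at hl; exact ih h t hl
      · rw [List.dropWhile_cons_of_neg hx] at hl
        cases hl; simpa using hx

-- membership in the run-length scan of a sorted list
theorem pvRuns_mem : ∀ (ys : List Int), ys.Pairwise (· ≤ ·) →
    ∀ p : Int × Int, p ∈ pvRuns ys ↔ p.1 ∈ ys ∧ p.2 = (ys.count p.1 : Int) := by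
  intro ys
  induction ys using pvRuns.induct with
  | case1 => intro _ p; simp [pvRuns]
  | case2 v rest ih =>
      intro hp p
      obtain ⟨hvle, hrest⟩ := List.pairwise_cons.mp hp
      have hsplit : rest.takeWhile (fun w => w == v) ++ rest.dropWhile (fun w => w == v) = rest :=
        List.takeWhile_append_dropWhile
      have hsame : ∀ x ∈ rest.takeWhile (fun w => w == v), x = v := by
        intro x hx; simpa using List.mem_takeWhile_imp hx
      have hother_pw : (rest.dropWhile (fun w => w == v)).Pairwise (· ≤ ·) :=
        List.Pairwise.sublist (List.dropWhile_sublist _) hrest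
      have hvother : ∀ w ∈ rest.dropWhile (fun w => w == v), v < w := by
        intro w hw
        cases hoth : rest.dropWhile (fun w => w == v) with
        | nil => rw [hoth] at hw; simp at hw
        | cons h t =>
            have hhne : h ≠ v := by
              have := pvDropWhile_head_false (fun w => w == v) rest h t hoth
              simpa using this
            have hhmem : h ∈ rest := (List.dropWhile_sublist _).subset (by rw [hoth]; simp)
            have hvh : v < h := lt_of_le_of_ne (hvle h hhmem) (Ne.symm hhne)
            rw [hoth] at hw
            rcases List.mem_cons.mp hw with rfl | hwt
            · exact hvh
            · have hhw : h ≤ w := by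
                rw [hoth] at hother_pw
                exact (List.pairwise_cons.mp hother_pw).1 w hwt
              exact lt_of_lt_of_le hvh hhw
      have hcount_same : (rest.takeWhile (fun w => w == v)).count v
          = (rest.takeWhile (fun w => w == v)).length := by
        rw [List.count_eq_length]
        intro b hb; exact (hsame b hb).symm
      have hcount_other0 : (rest.dropWhile (fun w => w == v)).count v = 0 := by
        rw [List.count_eq_zero]
        intro hv; exact lt_irrefl v (hvother v hv)
      have hcount_v : (v :: rest).count v
          = 1 + (rest.takeWhile (fun w => w == v)).length := by
        rw [List.count_cons_self]
        conv_lhs => rw [← hsplit]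
        rw [List.count_append, hcount_same, hcount_other0]
        omega
      have hcount_w : ∀ w ∈ rest.dropWhile (fun w => w == v),
          (v :: rest).count w = (rest.dropWhile (fun w => w == v)).count w := by
        intro w hw
        have hwv : w ≠ v := fun h => lt_irrefl v (h ▸ hvother w hw)
        have hsame0 : (rest.takeWhile (fun w => w == v)).count w = 0 := by
          rw [List.count_eq_zero]
          intro hmem; exact hwv (hsame w hmem)
        rw [List.count_cons_of_ne hwv.symm]
        conv_lhs => rw [← hsplit]
        rw [List.count_append, hsame0]
        omega
      rw [pvRuns]
      constructor
      · intro hmem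
        rcases List.mem_cons.mp hmem with rfl | hmem2
        · refine ⟨by simp, ?_⟩
          simp only [hcount_v]
          push_cast
          ring
        · obtain ⟨hm1, hm2⟩ := (ih hother_pw p).mp hmem2
          refine ⟨List.mem_cons_of_mem v ((List.dropWhile_sublist _).subset hm1), ?_⟩
          rw [hcount_w p.1 hm1]
          exact hm2
      · rintro ⟨hmem, hval⟩
        by_cases hpv : p.1 = v
        · refine List.mem_cons.mpr (Or.inl ?_)
          have hv2 : p.2 = (1 : Int) + (rest.takeWhile (fun w => w == v)).length := by
            rw [hval, hpv, hcount_v]; push_cast; ring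
          exact Prod.ext hpv hv2
        · refine List.mem_cons.mpr (Or.inr ?_)
          have hmem2 : p.1 ∈ rest := by
            rcases List.mem_cons.mp hmem with h | h
            · exact absurd h hpv
            · exact h
          have hmem3 : p.1 ∈ rest.dropWhile (fun w => w == v) := by
            rw [← hsplit] at hmem2
            rcases List.mem_append.mp hmem2 with h | h
            · exact absurd (hsame _ h) hpv
            · exact h
          exact (ih hother_pw p).mpr ⟨hmem3, by rw [hval, hcount_w p.1 hmem3]⟩

-- the keys of the run-length scan of a sorted list are strictly increasing
theorem pvRuns_keys_lt : ∀ (ys : List Int), ys.Pairwise (· ≤ ·) →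
    (pvRuns ys).Pairwise (fun p q : Int × Int => p.1 < q.1) := by
  intro ys
  induction ys using pvRuns.induct with
  | case1 => intro _; simp [pvRuns]
  | case2 v rest ih =>
      intro hp
      obtain ⟨hvle, hrest⟩ := List.pairwise_cons.mp hp
      have hother_pw : (rest.dropWhile (fun w => w == v)).Pairwise (· ≤ ·) :=
        List.Pairwise.sublist (List.dropWhile_sublist _) hrest
      have hvother : ∀ w ∈ rest.dropWhile (fun w => w == v), v < w := by
        intro w hw
        cases hoth : rest.dropWhile (fun w => w == v) with
        | nil => rw [hoth] at hw; simp at hw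
        | cons h t =>
            have hhne : h ≠ v := by
              have := pvDropWhile_head_false (fun w => w == v) rest h t hoth
              simpa using this
            have hhmem : h ∈ rest := (List.dropWhile_sublist _).subset (by rw [hoth]; simp)
            have hvh : v < h := lt_of_le_of_ne (hvle h hhmem) (Ne.symm hhne)
            rw [hoth] at hw
            rcases List.mem_cons.mp hw with rfl | hwt
            · exact hvh
            · have hhw : h ≤ w := by
                rw [hoth] at hother_pw
                exact (List.pairwise_cons.mp hother_pw).1 w hwt
              exact lt_of_lt_of_le hvh hhw
      rw [pvRuns]
      refine List.pairwise_cons.mpr ⟨?_, ih hother_pw⟩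
      intro q hq
      have := ((pvRuns_mem _ hother_pw q).mp hq).1
      exact hvother q.1 this

-- the two per-row pair lists are permutations of each other
theorem pvPairs_perm (nzr : List Int) :
    ((PySem.Set.ofList nzr).map (fun k => (k, (nzr.count k : Int)))).Perm
      (pvRuns (PySem.List.sorted nzr (fun x => x) false)) := by
  have hsorted : (PySem.List.sorted nzr (fun x => x) false).Pairwise (· ≤ ·) :=
    PySem.List.sorted_pairwise nzr (fun x => x)
  have hnodupL : ((PySem.Set.ofList nzr).map (fun k => (k, (nzr.count k : Int)))).Nodup := by
    refine List.Nodup.map ?_ (PySem.Set.nodup_ofList nzr)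
    intro a b h
    simpa using congrArg Prod.fst h
  have hnodupR : (pvRuns (PySem.List.sorted nzr (fun x => x) false)).Nodup := by
    refine (pvRuns_keys_lt _ hsorted).imp ?_
    intro p q h heq
    rw [heq] at h
    exact lt_irrefl _ h
  rw [List.perm_ext_iff_of_nodup hnodupL hnodupR]
  intro p
  rw [pvRuns_mem _ hsorted p]
  have hcnt : (PySem.List.sorted nzr (fun x => x) false).count p.1 = nzr.count p.1 :=
    (PySem.List.sorted_perm nzr (fun x => x) false).count_eq p.1
  rw [PySem.List.mem_sorted, hcnt]
  constructor
  · intro hm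
    rcases List.mem_map.mp hm with ⟨k, hk, rfl⟩
    exact ⟨(PySem.Set.mem_ofList nzr k).mp hk, rfl⟩
  · rintro ⟨h1, h2⟩
    refine List.mem_map.mpr ⟨p.1, (PySem.Set.mem_ofList nzr p.1).mpr h1, ?_⟩
    exact Prod.ext rfl h2.symm

-- per-row agreement of the two pipelines
theorem pvRow_eq (row : List Int) : pvRowA row = pvRowB row := by
  simp only [pvRowA, pvRowB]
  rw [pvCountA_eq row, pvPairsA_eq]
  have hperm := pvPairs_perm (row.filter (fun v => !(v == 0)))
  have hs : PySem.List.sorted2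
        ((PySem.Set.ofList (row.filter (fun v => !(v == 0)))).map
          (fun k => (k, ((row.filter (fun v => !(v == 0))).count k : Int))))
        (fun p => p.2) (fun p => p.1) false
      = PySem.List.sorted2
          (pvRuns (PySem.List.sorted (row.filter (fun v => !(v == 0))) (fun x => x) false))
          (fun p => p.2) (fun p => p.1) false := by
    rw [pvSorted2_eq_sorted_lex, pvSorted2_eq_sorted_lex]
    exact PySem.List.sorted_eq_sorted_of_perm _ _ _ pvLexKey_inj hperm
  rw [hs, PySem.List.foldl_append_eq_flatMap (fun p : Int × Int => [p.1, p.2])]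
  simp

-- A's accumulating loop, characterised
theorem pvFoldA (rowF : List Int -> List Int) :
    ∀ (l : List (List Int)) (na : List (List Int)) (ml : Int),
      l.foldl (fun st row => (st.1 ++ [rowF row], max st.2 ((rowF row).length : Int))) (na, ml)
        = (na ++ l.map rowF,
           (l.map rowF).foldl (fun m r => max m ((r.length : Int))) ml) := by
  intro l
  induction l with
  | nil => intro na ml; simp
  | cons x xs ih => intro na ml; simp [ih]

-- max with default 0 over nonnegative values is the left fold from 0
theorem pvMaxD_eq_foldl (ls : List Int) (h : ∀ x ∈ ls, 0 ≤ x) :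
    PySem.List.maxD ls (fun x => x) 0 = ls.foldl max 0 := by
  cases ls with
  | nil => simp [PySem.List.maxD_nil]
  | cons x t =>
      rw [PySem.List.maxD_id_cons]
      have : max (0 : Int) x = x := max_eq_right (h x (by simp))
      simp [this]

-- A's padding loop is arithmetic padding
theorem pvPadA_eq (row : List Int) (m : Int) :
    pvPadA row m = row ++ List.replicate (m - (row.length : Int)).toNat 0 := by
  induction row using pvPadA.induct (m := m) with
  | case1 x hlt ih =>
      rw [pvPadA, if_pos hlt, ih]
      have hk : (m - (x.length : Int)).toNat
          = ((m - (((x ++ [0]).length : Nat) : Int)).toNat) + 1 := by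
        simp only [List.length_append, List.length_cons, List.length_nil]
        omega
      rw [hk, List.append_assoc, List.replicate_succ]
      simp
  | case2 x hge =>
      rw [pvPadA, if_neg hge]
      have h0 : (m - (x.length : Int)).toNat = 0 := by omega
      simp [h0]

-- ===== VERDICT (by name: the statement is the Claim_ definition above) =====
theorem R_operation_spec : Claim_equal_R_operation := by
  intro arr _
  simp only [Spec_R_operation, R_operation, R_operation_alt]
  rw [pvFoldA pvRowA arr [] 0]
  have hrows : arr.map pvRowA = arr.map pvRowB := List.map_congr_left (fun r _ => pvRow_eq r)
  rw [hrows]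
  have hlen : ∀ x ∈ (arr.map pvRowB).map (fun r => ((r.length : Int))), 0 ≤ x := by
    intro x hx
    rcases List.mem_map.mp hx with ⟨r, _, rfl⟩
    exact Int.natCast_nonneg _
  have hM : PySem.List.maxD ((arr.map pvRowB).map (fun r => ((r.length : Int)))) (fun x => x) 0
      = (arr.map pvRowB).foldl (fun m r => max m ((r.length : Int))) 0 := by
    rw [pvMaxD_eq_foldl _ hlen]
    simp [List.foldl_map]
  rw [hM]
  simp only [List.nil_append]
  exact List.map_congr_left (fun r _ => pvPadA_eq r _)
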